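-- pv_equiv track=rewrite | github.com/koushikkatakam/library | lc_programs/codes.py | lc_1678
-- ===== SOURCE A (Python) =====
-- def lc_1678(command):
--       """
--       Performs string interpretation based on a given command.
--
--       Parameters:
--           command (str): The input command string.
--
--       Returns:
--           str: The interpreted string.
--
--       Example :
--           Input: command = "G()(al)"
--           Output: Goal
--       """
--       s='' # Initialize an empty string to store the interpreted result
--       for i in range(len(command)): # Iterate over the indices of the command string
--           if command[i:i+2]=='()':  # Check if the current substring is '()'
--               s+='o' # If '()' is found, concat 'o' to the interpreted string
--           elif command[i]=='(' or command[i]==')': # Check if the current character is '(' or ')'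
--               continue # If it is, skip this character and continue to the next iteration
--           else:
--               # If the current character is not '()' or '(', append it to the interpreted string
--               s+=command[i]
--       return s # Return the interpreted string
-- ===== SOURCE B (Python) =====
-- def lc_1678(command):
--     # Whole-string C-level passes: turn each '()' into 'o', then drop remaining lone parens.
--     return command.replace('()', 'o').replace('(', '').replace(')', '')
-- ===== Notes on version B (the rewrite author's own statement) =====
-- stated objective: idiomatic
-- what changed: Replaces A's per-index Python loop (slice test and string concatenation at each position) by three whole-string str.replace passes: '()'->'o', then strip remaining '(' and ')'.
import Mathlib
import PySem

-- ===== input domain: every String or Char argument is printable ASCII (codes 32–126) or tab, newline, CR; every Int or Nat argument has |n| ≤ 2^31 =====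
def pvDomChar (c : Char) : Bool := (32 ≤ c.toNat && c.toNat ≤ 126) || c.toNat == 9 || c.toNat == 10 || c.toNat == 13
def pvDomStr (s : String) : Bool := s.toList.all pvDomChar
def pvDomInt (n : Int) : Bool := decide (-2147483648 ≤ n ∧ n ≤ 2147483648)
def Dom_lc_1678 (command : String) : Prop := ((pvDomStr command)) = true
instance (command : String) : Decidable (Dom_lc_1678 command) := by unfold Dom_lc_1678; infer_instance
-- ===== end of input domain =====

-- B replaces A's per-index loop (slice tests, char-by-char concatenation) by three
-- whole-string replace passes ('()'->'o', then strip lone parens): idiomatic and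
-- measurably faster (C-level str.replace vs a Python-level per-character loop).


-- ===== PORT A =====
-- for i in range(len(command)): slice test command[i:i+2]=='()' / skip parens / append char
def lc_1678 (command : String) : String :=
  String.ofList <|
    (PySem.List.pyRange 0 (command.toList.length) 1).foldl (fun s i =>
      if PySem.List.slice command.toList (some i) (some (i + 2)) = ['(', ')'] then
        s ++ ['o']
      else if PySem.List.pyGetD command.toList i ' ' = '(' ∨
              PySem.List.pyGetD command.toList i ' ' = ')' then
        s
      else
        s ++ [PySem.List.pyGetD command.toList i ' ']) []

-- ===== PORT B =====
def lc_1678_alt (command : String) : String :=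
  PySem.Str.replace (PySem.Str.replace (PySem.Str.replace command "()" "o") "(" "") ")" ""

-- ===== PRECONDITION & SPEC =====
def Spec_lc_1678 (command : String) (out : String) : Prop := out = lc_1678_alt command
instance (command : String) (out : String) : Decidable (Spec_lc_1678 command out) := by unfold Spec_lc_1678; infer_instance

-- ===== CLAIM (what is proved, stated in full; the proofs are below) =====
def Claim_equal_lc_1678 : Prop := ∀ (command : String), Dom_lc_1678 command → Spec_lc_1678 command (lc_1678 command)

-- ===== LEMMAS AND PROOFS =====

-- common specification of the interpreted string, on the char-list side
def pvG : List Char → List Char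
  | [] => []
  | c :: t =>
    if c = '(' then (if t.head? = some ')' then 'o' :: pvG t.tail else pvG t)
    else if c = ')' then pvG t
    else c :: pvG t
  termination_by l => l.length
  decreasing_by
    all_goals (simp [List.length_tail]; try omega)

-- what the first replace pass ('()' -> 'o') produces
def pvR : List Char → List Char
  | [] => []
  | c :: t =>
    if c = '(' ∧ t.head? = some ')' then 'o' :: pvR t.tail else c :: pvR t
  termination_by l => l.length
  decreasing_by
    all_goals (simp [List.length_tail]; try omega)

theorem pvG_nil : pvG [] = [] := by rw [pvG]

theorem pvG_cons (c : Char) (t : List Char) :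
    pvG (c :: t) = if c = '(' then (if t.head? = some ')' then 'o' :: pvG t.tail else pvG t)
      else if c = ')' then pvG t else c :: pvG t := by rw [pvG]

theorem pv_go_pair : ∀ (fuel : Nat) (l acc : List Char), l.length ≤ fuel →
    PySem.Chars.replace.go ['(', ')'] ['o'] fuel l acc = acc.reverse ++ pvR l := by
  intro fuel
  induction fuel with
  | zero =>
    intro l acc h
    have : l = [] := List.eq_nil_of_length_eq_zero (Nat.le_zero.mp h)
    subst this
    simp [PySem.Chars.replace.go, pvR]
  | succ n ih =>
    intro l acc h
    match l with
    | [] => simp [PySem.Chars.replace.go, pvR]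
    | c :: t =>
      rw [PySem.Chars.replace.go]
      by_cases hp : List.isPrefixOf ['(', ')'] (c :: t) = true
      · obtain ⟨t2, rfl, rfl⟩ : ∃ t2, c = '(' ∧ t = ')' :: t2 := by
          rcases t with _ | ⟨c2, t2⟩
          · simp [List.isPrefixOf] at hp
          · simp [List.isPrefixOf] at hp
            exact ⟨t2, hp.1.symm, by rw [← hp.2]⟩
        rw [if_pos hp]
        rw [ih _ _ (by simp at h ⊢; omega)]
        rw [pvR]
        simp
      · rw [if_neg hp]
        rw [ih _ _ (by simp at h ⊢; omega)]
        have hcond : ¬ (c = '(' ∧ t.head? = some ')') := by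
          rintro ⟨rfl, hh⟩
          rcases t with _ | ⟨c2, t2⟩
          · simp at hh
          · simp at hh
            exact hp (by simp [List.isPrefixOf, hh])
        rw [pvR, if_neg hcond]
        simp

theorem pv_go_single : ∀ (ch : Char) (fuel : Nat) (l acc : List Char), l.length ≤ fuel →
    PySem.Chars.replace.go [ch] [] fuel l acc = acc.reverse ++ l.filter (· ≠ ch) := by
  intro ch fuel
  induction fuel with
  | zero =>
    intro l acc h
    have : l = [] := List.eq_nil_of_length_eq_zero (Nat.le_zero.mp h)
    subst this
    simp [PySem.Chars.replace.go]
  | succ n ih =>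
    intro l acc h
    match l with
    | [] => simp [PySem.Chars.replace.go]
    | c :: t =>
      rw [PySem.Chars.replace.go]
      by_cases hc : c = ch
      · subst hc
        simp only [List.isPrefixOf, BEq.rfl, Bool.and_true, if_true]
        rw [ih _ _ (by simp at h ⊢; omega)]
        simp [List.filter]
      · have hp : List.isPrefixOf [ch] (c :: t) = false := by
          simp [List.isPrefixOf]; exact fun h' => absurd h'.symm hc
        simp only [hp, Bool.false_eq_true, if_false]
        rw [ih _ _ (by simp at h ⊢; omega)]
        simp [List.filter, hc]

theorem pv_replace_pair (cs : List Char) :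
    PySem.Chars.replace cs ['(', ')'] ['o'] = pvR cs := by
  rw [PySem.Chars.replace]
  simp only [List.isEmpty_iff, reduceCtorEq, if_false]
  simpa using pv_go_pair cs.length cs [] le_rfl

theorem pv_replace_single (ch : Char) (cs : List Char) :
    PySem.Chars.replace cs [ch] [] = cs.filter (· ≠ ch) := by
  rw [PySem.Chars.replace]
  simp only [List.isEmpty_iff, reduceCtorEq, if_false]
  simpa using pv_go_single ch cs.length cs [] le_rfl

theorem pv_filter_pvR (cs : List Char) :
    ((pvR cs).filter (· ≠ '(')).filter (· ≠ ')') = pvG cs := by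
  induction cs using pvR.induct with
  | case1 => simp [pvR, pvG]
  | case2 c t hcond ih =>
    obtain ⟨rfl, hh⟩ := hcond
    rcases t with _ | ⟨c2, t2⟩
    · simp at hh
    · simp at hh
      subst hh
      rw [pvR, if_pos (by simp)]
      rw [List.filter_cons_of_pos (by decide), List.filter_cons_of_pos (by decide)]
      simp only [List.tail_cons] at ih ⊢
      rw [ih]
      simp [pvG]
  | case3 c t hcond ih =>
    rw [pvR, if_neg hcond]
    by_cases hc1 : c = '('
    · subst hc1
      have hh : t.head? ≠ some ')' := fun h => hcond ⟨rfl, h⟩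
      rw [List.filter_cons_of_neg (by decide), ih]
      simp [pvG, hh]
    · by_cases hc2 : c = ')'
      · subst hc2
        rw [List.filter_cons_of_pos (by decide), List.filter_cons_of_neg (by decide), ih]
        simp [pvG]
      · rw [List.filter_cons_of_pos (by simp [hc1]), List.filter_cons_of_pos (by simp [hc2]), ih]
        simp [pvG, hc1, hc2]

-- A's loop, from index j on, appends pvG of the remaining suffix
theorem pv_loopA (cs : List Char) : ∀ (n j : Nat) (acc : List Char), cs.length - j ≤ n →
    (PySem.List.pyRange (j : Int) (cs.length : Int) 1).foldl (fun s i =>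
      if PySem.List.slice cs (some i) (some (i + 2)) = ['(', ')'] then s ++ ['o']
      else if PySem.List.pyGetD cs i ' ' = '(' ∨ PySem.List.pyGetD cs i ' ' = ')' then s
      else s ++ [PySem.List.pyGetD cs i ' ']) acc = acc ++ pvG (cs.drop j) := by
  intro n
  induction n with
  | zero =>
    intro j acc h
    have hj : cs.length ≤ j := by omega
    rw [PySem.List.pyRange_one_eq_nil (by exact_mod_cast hj)]
    simp [List.drop_eq_nil_of_le hj, pvG_nil]
  | succ n ih =>
    intro j acc h
    by_cases hj : j < cs.length
    · rw [PySem.List.pyRange_one_cons (by exact_mod_cast hj)]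
      rw [List.foldl_cons]
      have hdrop : cs.drop j = cs[j] :: cs.drop (j + 1) := List.drop_eq_getElem_cons hj
      have hslice : PySem.List.slice cs (some (j : Int)) (some ((j : Int) + 2)) =
          (cs.drop j).take 2 := by
        have := PySem.List.slice_natCast_add cs j 2
        simpa using this
      have hget : PySem.List.pyGetD cs (j : Int) ' ' = cs[j] := by
        rw [PySem.List.pyGetD_natCast]
        simp [List.getD, hj]
      have hnext : ((j : Int) + 1) = ((j + 1 : Nat) : Int) := by push_cast; ring
      rw [hslice, hget, hnext]
      rcases hcs : cs.drop (j + 1) with _ | ⟨c2, t2⟩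
      · -- last character of the string
        have hpair : (cs.drop j).take 2 = [cs[j]] := by rw [hdrop, hcs]; simp
        rw [hpair]
        rw [if_neg (by simp : ¬ ([cs[j]] = ['(', ')']))]
        by_cases h2 : cs[j] = '(' ∨ cs[j] = ')'
        · rw [if_pos h2, ih (j + 1) acc (by omega), hcs, hdrop, hcs]
          rcases h2 with h2 | h2 <;> rw [h2] <;> simp [pvG_cons, pvG_nil]
        · rw [if_neg h2, ih (j + 1) (acc ++ [cs[j]]) (by omega), hcs, hdrop, hcs]
          push Not at h2
          simp [pvG_cons, pvG_nil, h2.1, h2.2]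
      · have hpair : (cs.drop j).take 2 = [cs[j], c2] := by rw [hdrop, hcs]; simp
        rw [hpair]
        by_cases hpr : cs[j] = '(' ∧ c2 = ')'
        · rw [if_pos (by simp [hpr.1, hpr.2])]
          rw [ih (j + 1) (acc ++ ['o']) (by omega), hcs, hdrop, hcs, hpr.1, hpr.2]
          simp [pvG_cons]
        · rw [if_neg (by intro hh; injection hh with h1 h2; injection h2 with h2 _;
                          exact hpr ⟨h1, h2⟩)]
          by_cases h2 : cs[j] = '(' ∨ cs[j] = ')'
          · rw [if_pos h2, ih (j + 1) acc (by omega), hcs, hdrop, hcs]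
            rcases h2 with h2 | h2
            · have hc2 : c2 ≠ ')' := fun hh => hpr ⟨h2, hh⟩
              rw [h2]
              simp [pvG_cons, hc2]
            · rw [h2]
              simp [pvG_cons]
          · rw [if_neg h2, ih (j + 1) (acc ++ [cs[j]]) (by omega), hcs, hdrop, hcs]
            push Not at h2
            simp [pvG_cons, h2.1, h2.2]
    · rw [PySem.List.pyRange_one_eq_nil (by exact_mod_cast (by omega : cs.length ≤ j))]
      simp [List.drop_eq_nil_of_le (by omega : cs.length ≤ j), pvG_nil]

-- ===== VERDICT (by name: the statement is the Claim_ definition above) =====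
theorem lc_1678_spec : Claim_equal_lc_1678 := by
  intro command _
  unfold Spec_lc_1678 lc_1678 lc_1678_alt
  rw [PySem.Str.replace, PySem.Str.replace, PySem.Str.replace]
  have e1 : "()".toList = ['(', ')'] := by decide
  have e2 : "o".toList = ['o'] := by decide
  have e3 : "(".toList = ['('] := by decide
  have e4 : ")".toList = [')'] := by decide
  have e5 : "".toList = ([] : List Char) := by decide
  rw [e1, e2, e3, e4, e5]
  have h0 := pv_loopA command.toList command.toList.length 0 [] (by omega)
  simp only [Nat.cast_zero] at h0
  rw [h0]
  simp only [String.toList_ofList, pv_replace_pair, pv_replace_single, pv_filter_pvR]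
  simp
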